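-- pv_equiv track=rewrite | github.com/copperfield42/naturales | _Naturales.py | factorizacion_ds
-- ===== SOURCE A (Python) =====
-- def factorizacion_ds(n:int) -> (int,int):
--     """Regresa una tupla (d,s) con d impar tales que n = d*(2^s) [+1](segun n sea impar o no)
--
--        Si n es par halla:       n  = d*2^s
--        Si n es impar halla:   n -1 = d*2^s  """
--     if n<2:
--         raise ValueError("n debe ser >=2")
--     d = n if not n&1 else n - 1
--     s = 0
--     while not d&1:#mientras d sea par
--         d, s = d >> 1, s + 1
--     return (d,s)
-- ===== SOURCE B (Python) =====
-- def factorizacion_ds(n: int) -> (int, int):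
--     """Regresa una tupla (d,s) con d impar tales que n = d*(2^s) [+1](segun n sea impar o no)"""
--     if n < 2:
--         raise ValueError("n debe ser >=2")
--     d = n if not n & 1 else n - 1
--     s = (d & -d).bit_length() - 1
--     return (d >> s, s)
-- ===== Notes on version B (the rewrite author's own statement) =====
-- stated objective: idiomatic
-- what changed: Replaces the iterative halving while-loop with a closed-form bit extraction: s = (d & -d).bit_length() - 1 and d >> s, so no loop is executed.
import Mathlib
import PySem

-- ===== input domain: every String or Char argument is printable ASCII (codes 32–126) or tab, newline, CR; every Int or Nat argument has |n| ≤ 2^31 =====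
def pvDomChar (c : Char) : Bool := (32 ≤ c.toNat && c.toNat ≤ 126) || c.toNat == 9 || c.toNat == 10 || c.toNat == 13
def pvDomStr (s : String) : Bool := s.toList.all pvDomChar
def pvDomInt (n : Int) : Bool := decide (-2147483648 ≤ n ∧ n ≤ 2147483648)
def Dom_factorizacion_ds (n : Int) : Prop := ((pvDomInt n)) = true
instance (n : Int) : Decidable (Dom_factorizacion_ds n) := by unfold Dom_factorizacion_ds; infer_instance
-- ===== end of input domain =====

-- B replaces A's iterative halving loop by a closed-form bit extraction
-- (s = (d & -d).bit_length() - 1; d >> s); equivalence on n ≥ 2 (A raises ValueError below 2).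

-- ===== PORT A =====
-- the while loop 'while not d&1: d, s = d >> 1, s + 1'; fuel d.toNat is enough since
-- each iteration halves a positive d (a totality guard only, never reached as the stop condition)
def pvLoopA : Nat → Int → Int → Int × Int
  | 0, d, s => (d, s)
  | fuel+1, d, s =>
    if Int.land d 1 = 0 then pvLoopA fuel (d >>> 1) (s + 1) else (d, s)

def factorizacion_ds (n : Int) : Int × Int :=
  if n < 2 then (0, 0)   -- Python: raise ValueError("n debe ser >=2"); excluded by Pre_
  else
    let d : Int := if ¬ (Int.land n 1 = 0) = false then n else n - 1
    pvLoopA d.toNat d 0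

-- ===== PORT B =====
-- Python int.bit_length(): number of bits needed; exact for m ≥ 0 (the only use here)
def pvBitLength (m : Int) : Int :=
  if m ≤ 0 then 0 else (Nat.log2 m.toNat : Int) + 1

-- Python 'a >> b': exact for b ≥ 0 (the only use here; Python raises on b < 0)
def pyShiftRight (a b : Int) : Int := a >>> b.toNat

def factorizacion_ds_alt (n : Int) : Int × Int :=
  if n < 2 then (0, 0)   -- Python: raise ValueError("n debe ser >=2"); excluded by Pre_
  else
    let d : Int := if ¬ (Int.land n 1 = 0) = false then n else n - 1
    let s : Int := pvBitLength (Int.land d (-d)) - 1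
    (pyShiftRight d s, s)

-- ===== PRECONDITION & SPEC =====
-- exactly the inputs on which Python's A returns (it raises ValueError for n < 2)
def Pre_factorizacion_ds (n : Int) : Prop := 2 ≤ n
instance (n : Int) : Decidable (Pre_factorizacion_ds n) := by unfold Pre_factorizacion_ds; infer_instance
def pvWitness_factorizacion_ds : Int := 48

def Spec_factorizacion_ds (n : Int) (out : Int × Int) : Prop := out = factorizacion_ds_alt n
instance (n : Int) (out : Int × Int) : Decidable (Spec_factorizacion_ds n out) := by unfold Spec_factorizacion_ds; infer_instance

-- ===== CLAIM (what is proved, stated in full; the proofs are below) =====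
def Claim_equal_factorizacion_ds : Prop := ∀ (n : Int), Dom_factorizacion_ds n → Pre_factorizacion_ds n → Spec_factorizacion_ds n (factorizacion_ds n)

-- ===== LEMMAS AND PROOFS =====

-- lowbit of an odd number is 1
theorem ldiff_odd (m : Nat) (h : m % 2 = 1) : Nat.ldiff m (m-1) = 1 := by
  apply Nat.eq_of_testBit_eq
  intro i
  cases i with
  | zero =>
    have h2 : (m-1) % 2 = 0 := by omega
    rw [Nat.testBit_ldiff]
    simp [Nat.testBit_zero, h, h2]
  | succ j =>
    rw [Nat.testBit_ldiff, Nat.testBit_succ, Nat.testBit_succ, Nat.testBit_succ]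
    have e : m / 2 = (m-1)/2 := by omega
    rw [e]; simp

-- lowbit doubles with the argument
theorem ldiff_even (a : Nat) (h : 0 < a) : Nat.ldiff (2*a) (2*a-1) = 2 * Nat.ldiff a (a-1) := by
  apply Nat.eq_of_testBit_eq
  intro i
  cases i with
  | zero =>
    rw [Nat.testBit_ldiff]
    have h1 : (2*a) % 2 = 0 := by omega
    have h2 : (2*(Nat.ldiff a (a-1))) % 2 = 0 := by omega
    simp [Nat.testBit_zero, h1, h2]
  | succ j =>
    rw [Nat.testBit_ldiff, Nat.testBit_succ, Nat.testBit_succ, Nat.testBit_succ]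
    have e1 : 2*a/2 = a := by omega
    have e2 : (2*a-1)/2 = a-1 := by omega
    have e3 : 2 * Nat.ldiff a (a-1) / 2 = Nat.ldiff a (a-1) := by omega
    rw [e1, e2, e3, Nat.testBit_ldiff]

theorem ldiff_pos (m : Nat) (h : 0 < m) : 0 < Nat.ldiff m (m-1) := by
  induction m using Nat.strong_induction_on with
  | _ m ih =>
    rcases Nat.even_or_odd m with ⟨a, ha⟩ | ho
    · have ha' : m = 2*a := by omega
      have hpos : 0 < a := by omega
      rw [ha', ldiff_even a hpos]
      have := ih a (by omega) hpos
      omega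
    · obtain ⟨k, hk⟩ := ho
      rw [ldiff_odd m (by omega)]; omega

theorem log2_two_mul (a : Nat) (h : 0 < a) : Nat.log2 (2*a) = Nat.log2 a + 1 := by
  rw [Nat.log2_eq_log_two, Nat.log2_eq_log_two, mul_comm,
    Nat.log_mul_base one_lt_two (by omega)]

-- Python's (m & -m) for a positive int m, in Nat terms
theorem land_neg_self (m : Nat) (h : 0 < m) :
    Int.land (m : Int) (-(m : Int)) = ((Nat.ldiff m (m-1) : Nat) : Int) := by
  have hneg : -((m : Int)) = Int.negSucc (m-1) := by
    cases m with
    | zero => omega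
    | succ k => rfl
  rw [hneg]
  rfl

-- number of trailing zeros of a positive m, as B computes it
def pvTz (m : Nat) : Nat := Nat.log2 (Nat.ldiff m (m-1))

theorem tz_odd (m : Nat) (h : m % 2 = 1) : pvTz m = 0 := by
  unfold pvTz; rw [ldiff_odd m h]; rfl

theorem tz_even (a : Nat) (h : 0 < a) : pvTz (2*a) = pvTz a + 1 := by
  unfold pvTz
  rw [ldiff_even a h, log2_two_mul _ (ldiff_pos a h)]

theorem land_one_nat (m : Nat) : Int.land (m : Int) 1 = ((m % 2 : Nat) : Int) := by
  show Int.ofNat (m &&& 1) = Int.ofNat (m % 2)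
  rw [Nat.and_one_is_mod]

-- A's loop computes exactly (m >>> tz, s + tz)
theorem loopA_eq (m : Nat) : 0 < m → ∀ fuel, m ≤ fuel → ∀ s : Int,
    pvLoopA fuel (m : Int) s = (((m >>> pvTz m : Nat) : Int), s + (pvTz m : Int)) := by
  induction m using Nat.strong_induction_on with
  | _ m ih =>
    intro hm fuel hfuel s
    rcases Nat.even_or_odd m with ⟨a, ha⟩ | ho
    · -- even: one loop step then the induction hypothesis at a = m/2
      have ha' : m = 2*a := by omega
      have hapos : 0 < a := by omega
      cases fuel with
      | zero => omega
      | succ f =>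
        have hmod : m % 2 = 0 := by omega
        have hland : Int.land (m : Int) 1 = 0 := by
          rw [land_one_nat, hmod]; rfl
        have hshift : (m : Int) >>> (1:Int) = (a : Int) := by
          show Int.ofNat (m >>> 1) = Int.ofNat a
          have h1 : m >>> 1 = a := by
            rw [Nat.shiftRight_succ, Nat.shiftRight_zero]; omega
          rw [h1]
        rw [pvLoopA, if_pos hland, hshift,
          ih a (by omega) hapos f (by omega) (s+1)]
        rw [ha', tz_even a hapos]
        simp only [Prod.mk.injEq]
        refine ⟨?_, by push_cast; ring⟩
        have hsh : (2*a) >>> (pvTz a + 1) = a >>> pvTz a := by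
          rw [Nat.shiftRight_eq_div_pow, Nat.shiftRight_eq_div_pow, pow_succ,
            mul_comm ((2:Nat)^(pvTz a)) 2, Nat.mul_div_mul_left a ((2:Nat)^(pvTz a)) (by norm_num)]
        exact_mod_cast congrArg (Nat.cast : Nat → Int) hsh.symm
    · -- odd: the loop stops immediately
      obtain ⟨k, hk⟩ := ho
      have hmod : m % 2 = 1 := by omega
      have hland : ¬ Int.land (m : Int) 1 = 0 := by
        rw [land_one_nat, hmod]; decide
      cases fuel with
      | zero => omega
      | succ f =>
        rw [pvLoopA, if_neg hland, tz_odd m hmod]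
        simp

-- B's closed form computes the same pair for a positive d = ↑m
theorem altCore_eq (m : Nat) (h : 0 < m) :
    (pyShiftRight (m : Int) (pvBitLength (Int.land (m : Int) (-(m : Int))) - 1),
      pvBitLength (Int.land (m : Int) (-(m : Int))) - 1)
    = (((m >>> pvTz m : Nat) : Int), (pvTz m : Int)) := by
  rw [land_neg_self m h]
  have hld := ldiff_pos m h
  have hbl : pvBitLength ((Nat.ldiff m (m-1) : Nat) : Int) = (pvTz m : Int) + 1 := by
    unfold pvBitLength
    rw [if_neg (by omega)]
    have ht : ((Nat.ldiff m (m-1) : Nat) : Int).toNat = Nat.ldiff m (m-1) := by omega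
    rw [ht]
    rfl
  rw [hbl]
  simp only [Prod.mk.injEq]
  refine ⟨?_, by ring⟩
  unfold pyShiftRight
  have e1 : ((pvTz m : Int) + 1 - 1) = (pvTz m : Int) := by ring
  rw [e1]
  have e2 : ((pvTz m : Int)).toNat = pvTz m := by omega
  rw [e2]
  rfl

-- both ports' shared core, for any positive d
theorem core_eq (d : Int) (hd : 0 < d) :
    pvLoopA d.toNat d 0 =
      (pyShiftRight d (pvBitLength (Int.land d (-d)) - 1),
        pvBitLength (Int.land d (-d)) - 1) := by
  obtain ⟨m, hm⟩ : ∃ m : Nat, d = (m : Int) := ⟨d.toNat, by omega⟩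
  have hmpos : 0 < m := by omega
  have htoNat : d.toNat = m := by omega
  rw [hm]
  simp only [Int.toNat_natCast]
  rw [loopA_eq m hmpos m (le_refl m) 0, altCore_eq m hmpos]
  simp

-- ===== VERDICT (by name: the statement is the Claim_ definition above) =====
theorem factorizacion_ds_spec : Claim_equal_factorizacion_ds := by
  intro n _ hpre
  unfold Spec_factorizacion_ds
  have hpre' : (2:Int) ≤ n := hpre
  have hn2 : ¬ n < 2 := not_lt.mpr hpre'
  simp only [factorizacion_ds, factorizacion_ds_alt, if_neg hn2]
  generalize hd : (if ¬ (Int.land n 1 = 0) = false then n else n - 1) = d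
  have hdpos : 0 < d := by
    rw [← hd]; split <;> omega
  exact core_eq d hdpos
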